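-- pv_equiv track=rewrite | github.com/hoa-king/Fundamentos | preparacion.py | clasificar_creditos
-- ===== SOURCE A (Python) =====
-- def clasificar_creditos(creditos_estudiantes):
--     rangos = {
--         "Bajo": 0,
--         "Medio": 0,
--         "Alto": 0
--     }
--     for credito in creditos_estudiantes.values():
--         if credito < 100:
--             rangos["Bajo"] += 1
--         elif credito <= 150:
--             rangos["Medio"] += 1
--         else:
--             rangos["Alto"] += 1
--     return rangos
-- ===== SOURCE B (Python) =====
-- def clasificar_creditos(creditos_estudiantes):
--     valores = list(creditos_estudiantes.values())
--     bajo = sum(1 for c in valores if c < 100)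
--     medio = sum(1 for c in valores if 100 <= c <= 150)
--     alto = sum(1 for c in valores if c > 150)
--     return {"Bajo": bajo, "Medio": medio, "Alto": alto}
-- ===== Notes on version B (the rewrite author's own statement) =====
-- stated objective: idiomatic
-- what changed: Replaces the single branch-per-element loop mutating a dict with three independent counting passes over the values, one per bucket, assembled into the result dict at the end.
import Mathlib
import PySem

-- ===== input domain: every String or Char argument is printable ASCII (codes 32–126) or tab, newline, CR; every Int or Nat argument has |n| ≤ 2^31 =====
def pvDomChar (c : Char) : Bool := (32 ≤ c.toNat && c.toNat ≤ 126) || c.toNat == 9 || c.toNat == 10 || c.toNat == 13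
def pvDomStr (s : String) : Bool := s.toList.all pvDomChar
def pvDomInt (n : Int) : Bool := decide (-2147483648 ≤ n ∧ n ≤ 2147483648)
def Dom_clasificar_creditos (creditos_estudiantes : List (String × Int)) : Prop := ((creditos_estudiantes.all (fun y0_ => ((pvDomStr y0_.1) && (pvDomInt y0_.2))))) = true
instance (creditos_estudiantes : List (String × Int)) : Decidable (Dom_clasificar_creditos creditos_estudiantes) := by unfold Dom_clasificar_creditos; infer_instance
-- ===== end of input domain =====

-- B replaces A's single branch-per-element loop mutating a dict by three independent
-- counting passes over the values, one per bucket (idiomatic decomposition; same cost).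


-- ===== PORT A =====
-- rangos = {"Bajo": 0, "Medio": 0, "Alto": 0}; for credito in values: branch and += 1; return rangos
def clasificar_creditos (creditos_estudiantes : List (String × Int)) : List (String × Int) :=
  let rangos : PySem.Dict String Int :=
    ((PySem.Dict.empty.insert "Bajo" 0).insert "Medio" 0).insert "Alto" 0
  let final :=
    (PySem.Dict.mk creditos_estudiantes).values.foldl
      (fun r credito =>
        if credito < 100 then r.modify "Bajo" 0 (· + 1)
        else if credito ≤ 150 then r.modify "Medio" 0 (· + 1)
        else r.modify "Alto" 0 (· + 1)) rangos
  final.items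

-- ===== PORT B =====
-- three independent counting passes over the values, then assemble the dict
def clasificar_creditos_alt (creditos_estudiantes : List (String × Int)) : List (String × Int) :=
  let valores := (PySem.Dict.mk creditos_estudiantes).values
  let bajo : Int := valores.countP (fun c => decide (c < 100))
  let medio : Int := valores.countP (fun c => decide (100 ≤ c ∧ c ≤ 150))
  let alto : Int := valores.countP (fun c => decide (150 < c))
  [("Bajo", bajo), ("Medio", medio), ("Alto", alto)]

-- ===== PRECONDITION & SPEC =====
def Spec_clasificar_creditos (creditos_estudiantes : List (String × Int)) (out : List (String × Int)) : Prop := out = clasificar_creditos_alt creditos_estudiantes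
instance (creditos_estudiantes : List (String × Int)) (out : List (String × Int)) : Decidable (Spec_clasificar_creditos creditos_estudiantes out) := by unfold Spec_clasificar_creditos; infer_instance

-- ===== CLAIM (what is proved, stated in full; the proofs are below) =====
def Claim_equal_clasificar_creditos : Prop := ∀ (creditos_estudiantes : List (String × Int)), Dom_clasificar_creditos creditos_estudiantes → Spec_clasificar_creditos creditos_estudiantes (clasificar_creditos creditos_estudiantes)

-- ===== LEMMAS AND PROOFS =====

-- Loop invariant for A: folding over any value list starting from a literal three-key dict
-- adds the three bucket counts to the respective entries.
theorem pv_loop_inv (l : List Int) (b m a : Int) :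
    (l.foldl
      (fun r credito =>
        if credito < 100 then r.modify "Bajo" 0 (· + 1)
        else if credito ≤ 150 then r.modify "Medio" 0 (· + 1)
        else r.modify "Alto" 0 (· + 1))
      (PySem.Dict.mk [("Bajo", b), ("Medio", m), ("Alto", a)]))
    = PySem.Dict.mk [("Bajo", b + l.countP (fun c => decide (c < 100))),
                     ("Medio", m + l.countP (fun c => decide (100 ≤ c ∧ c ≤ 150))),
                     ("Alto", a + l.countP (fun c => decide (150 < c)))] := by
  induction l generalizing b m a with
  | nil => simp
  | cons x xs ih =>
    simp only [List.foldl_cons]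
    by_cases h1 : x < 100
    · rw [if_pos h1]
      have hd : (PySem.Dict.mk [("Bajo", b), ("Medio", m), ("Alto", a)]).modify "Bajo" 0 (· + 1)
          = PySem.Dict.mk [("Bajo", b + 1), ("Medio", m), ("Alto", a)] := by
        simp [PySem.Dict.modify, PySem.Dict.insert, PySem.Dict.getD, PySem.Dict.get?,
          PySem.Dict.contains]
      rw [hd, ih]
      have e1 : decide (x < 100) = true := by simp [h1]
      have e3 : decide (150 < x) = false := by simp; omega
      simp [List.countP_cons, e1, e3]
      omega
    · rw [if_neg h1]
      by_cases h2 : x ≤ 150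
      · rw [if_pos h2]
        have hd : (PySem.Dict.mk [("Bajo", b), ("Medio", m), ("Alto", a)]).modify "Medio" 0 (· + 1)
            = PySem.Dict.mk [("Bajo", b), ("Medio", m + 1), ("Alto", a)] := by
          simp [PySem.Dict.modify, PySem.Dict.insert, PySem.Dict.getD, PySem.Dict.get?,
            PySem.Dict.contains]
        rw [hd, ih]
        have e1 : decide (x < 100) = false := by simp [h1]
        have e3 : decide (150 < x) = false := by simp; omega
        simp [List.countP_cons, e1, e3]
        omega
      · rw [if_neg h2]
        have hd : (PySem.Dict.mk [("Bajo", b), ("Medio", m), ("Alto", a)]).modify "Alto" 0 (· + 1)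
            = PySem.Dict.mk [("Bajo", b), ("Medio", m), ("Alto", a + 1)] := by
          simp [PySem.Dict.modify, PySem.Dict.insert, PySem.Dict.getD, PySem.Dict.get?,
            PySem.Dict.contains]
        rw [hd, ih]
        have e1 : decide (x < 100) = false := by simp [h1]
        have e3 : decide (150 < x) = true := by simp; omega
        simp [List.countP_cons, e1, e3]
        omega

-- ===== VERDICT (by name: the statement is the Claim_ definition above) =====
theorem clasificar_creditos_spec : Claim_equal_clasificar_creditos := by
  intro l _
  unfold Spec_clasificar_creditos clasificar_creditos clasificar_creditos_alt
  have hinit : ((PySem.Dict.empty.insert "Bajo" (0:Int)).insert "Medio" 0).insert "Alto" 0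
      = PySem.Dict.mk [("Bajo", 0), ("Medio", 0), ("Alto", 0)] := by decide
  simp only [hinit, pv_loop_inv, zero_add]
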